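-- pv_equiv track=rewrite | github.com/AlexVanMechelen/docker-packing-box | src/lib/pbox/common/utils.py | shorten_str
-- ===== SOURCE A (Python) =====
-- def shorten_str(string, l=80):
--     """ Shorten a string, possibly represented as a comma-separated list. """
--     i = 0
--     if len(string) <= l:
--         return string
--     s = ",".join(string.split(",")[:-1])
--     if len(s) == 0:
--         return string[:l-3] + "..."
--     while 1:
--         t = s.split(",")
--         if len(t) > 1:
--             s = ",".join(t[:-1])
--             if len(s) < l-3:
--                 return s + "..."
--         else:
--             return s[:l-3] + "..."
--     return s + "..."
-- ===== SOURCE B (Python) =====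
-- def shorten_str(string, l=80):
--     """ Shorten a string, possibly represented as a comma-separated list. """
--     if len(string) <= l:
--         return string
--     parts = string.split(",")
--     if len(",".join(parts[:-1])) == 0:
--         return string[:l-3] + "..."
--     for k in range(len(parts) - 2, 0, -1):
--         s = ",".join(parts[:k])
--         if len(s) < l - 3:
--             return s + "..."
--     return parts[0][:l-3] + "..."
-- ===== Notes on version B (the rewrite author's own statement) =====
-- stated objective: simpler
-- what changed: Replaces A's while-loop that re-splits and re-joins the shrinking string once per pass with a single split into parts followed by a descending scan over prefix lengths k, joining parts[:k] and returning the first prefix that fits.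
import Mathlib
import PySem

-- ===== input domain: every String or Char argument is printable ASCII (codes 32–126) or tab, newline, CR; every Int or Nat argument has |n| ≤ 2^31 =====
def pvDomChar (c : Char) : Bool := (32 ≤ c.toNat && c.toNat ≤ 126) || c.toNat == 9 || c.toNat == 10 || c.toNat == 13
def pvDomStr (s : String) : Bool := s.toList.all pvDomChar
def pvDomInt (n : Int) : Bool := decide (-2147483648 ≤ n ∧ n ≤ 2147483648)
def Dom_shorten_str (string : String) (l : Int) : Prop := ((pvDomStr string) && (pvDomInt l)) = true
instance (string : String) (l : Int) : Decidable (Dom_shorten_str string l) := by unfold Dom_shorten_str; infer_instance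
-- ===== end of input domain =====

-- B replaces A's re-split/re-join-one-part-at-a-time while-loop by a split-once descending
-- scan over prefix lengths k (objective: simpler decomposition, same asymptotic cost).

-- ===== PORT A =====
-- A's `while 1` loop: each pass re-splits s, drops the last part and either returns or loops.
-- The loop is ported with a fuel counter (initial s.length + 1, provably sufficient: each pass
-- strictly shortens s); the fuel-0 branch returns s + "..." like A's dead final `return`.
def shorten_str_aLoop (l : Int) : Nat → List Char → List Char
  | 0, s => s ++ ['.', '.', '.']
  | fuel + 1, s =>
    let t := PySem.Chars.splitOn s [','];
    if 1 < t.length then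
      let s' := PySem.Chars.join [','] (PySem.List.slice t none (some (-1)));
      if PySem.Chars.len s' < l - 3 then s' ++ ['.', '.', '.']
      else shorten_str_aLoop l fuel s'
    else PySem.List.slice s none (some (l - 3)) ++ ['.', '.', '.']

def shorten_str (string : String) (l : Int) : String :=
  let cs := string.toList
  if PySem.Chars.len cs ≤ l then string
  else
    let s := PySem.Chars.join [','] (PySem.List.slice (PySem.Chars.splitOn cs [',']) none (some (-1)))
    if PySem.Chars.len s = 0 then String.ofList (PySem.List.slice cs none (some (l - 3)) ++ ['.', '.', '.'])
    else String.ofList (shorten_str_aLoop l (s.length + 1) s)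

-- ===== PORT B =====
-- B's `for k in range(len(parts)-2, 0, -1)` early-return loop, as recursion over the range list.
def shorten_str_bLoop (ps : List (List Char)) (l : Int) : List Int → Option (List Char)
  | [] => none
  | k :: ks =>
    let s := PySem.Chars.join [','] (PySem.List.slice ps none (some k));
    if PySem.Chars.len s < l - 3 then some (s ++ ['.', '.', '.'])
    else shorten_str_bLoop ps l ks

def shorten_str_alt (string : String) (l : Int) : String :=
  let cs := string.toList
  if PySem.Chars.len cs ≤ l then string
  else
    let ps := PySem.Chars.splitOn cs [',']
    if PySem.Chars.len (PySem.Chars.join [','] (PySem.List.slice ps none (some (-1)))) = 0 then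
      String.ofList (PySem.List.slice cs none (some (l - 3)) ++ ['.', '.', '.'])
    else
      match shorten_str_bLoop ps l (PySem.List.pyRange ((ps.length : Int) - 2) 0 (-1)) with
      | some r => String.ofList r
      -- parts[0]: split() always returns a nonempty list, so Python never raises here;
      -- ported with default [] (exact, since ps ≠ [] is provable).
      | none => String.ofList (PySem.List.slice (PySem.List.pyGetD ps 0 []) none (some (l - 3)) ++ ['.', '.', '.'])

-- ===== PRECONDITION & SPEC =====
def Spec_shorten_str (string : String) (l : Int) (out : String) : Prop := out = shorten_str_alt string l
instance (string : String) (l : Int) (out : String) : Decidable (Spec_shorten_str string l out) := by unfold Spec_shorten_str; infer_instance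

-- ===== CLAIM (what is proved, stated in full; the proofs are below) =====
def Claim_equal_shorten_str : Prop := ∀ (string : String) (l : Int), Dom_shorten_str string l → Spec_shorten_str string l (shorten_str string l)

-- ===== LEMMAS AND PROOFS =====

-- step equations for PySem.Chars.splitOn.go at sep = [',']
theorem go_nil (fuel : Nat) (cur : List Char) (acc : List (List Char)) :
    PySem.Chars.splitOn.go [','] fuel [] cur acc = (cur.reverse :: acc).reverse := by
  cases fuel <;> simp [PySem.Chars.splitOn.go]

theorem go_cons_comma (fuel : Nat) (l cur : List Char) (acc : List (List Char)) :
    PySem.Chars.splitOn.go [','] (fuel + 1) (',' :: l) cur acc =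
      PySem.Chars.splitOn.go [','] fuel l [] (cur.reverse :: acc) := by
  simp [PySem.Chars.splitOn.go, List.isPrefixOf]

theorem go_cons_ne (fuel : Nat) (c : Char) (l cur : List Char) (acc : List (List Char))
    (h : c ≠ ',') :
    PySem.Chars.splitOn.go [','] (fuel + 1) (c :: l) cur acc =
      PySem.Chars.splitOn.go [','] fuel l (c :: cur) acc := by
  simp [PySem.Chars.splitOn.go, List.isPrefixOf, (Ne.symm h)]

-- consuming a comma-free prefix
theorem go_skip (p : List Char) (hp : ',' ∉ p) :
    ∀ (fuel : Nat) (l cur : List Char) (acc : List (List Char)), p.length ≤ fuel →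
      PySem.Chars.splitOn.go [','] fuel (p ++ l) cur acc =
        PySem.Chars.splitOn.go [','] (fuel - p.length) l (p.reverse ++ cur) acc := by
  induction p with
  | nil => intro fuel l cur acc _; simp
  | cons c p ih =>
      intro fuel l cur acc hf
      cases fuel with
      | zero => simp at hf
      | succ fuel =>
          have hc : c ≠ ',' := by intro h; exact hp (h ▸ List.mem_cons_self)
          have hp' : ',' ∉ p := fun h => hp (List.mem_cons_of_mem _ h)
          rw [List.cons_append, go_cons_ne fuel c (p ++ l) cur acc hc,
              ih hp' fuel l (c :: cur) acc (Nat.le_of_succ_le_succ hf)]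
          simp

theorem go_join (ps : List (List Char)) (hne : ps ≠ []) (hcf : ∀ p ∈ ps, ',' ∉ p) :
    ∀ (fuel : Nat) (acc : List (List Char)), (PySem.Chars.join [','] ps).length ≤ fuel →
      PySem.Chars.splitOn.go [','] fuel (PySem.Chars.join [','] ps) [] acc =
        (ps.reverse ++ acc).reverse := by
  induction ps with
  | nil => exact absurd rfl hne
  | cons p ps ih =>
      intro fuel acc hf
      cases ps with
      | nil =>
          rw [PySem.Chars.join_singleton] at hf ⊢
          have := go_skip p (hcf p List.mem_cons_self) fuel [] [] acc hf
          simpa [go_nil] using this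
      | cons q rest =>
          have hpf : ',' ∉ p := hcf p List.mem_cons_self
          have hcf' : ∀ r ∈ q :: rest, ',' ∉ r := fun r hr => hcf r (List.mem_cons_of_mem _ hr)
          rw [PySem.Chars.join_cons_cons] at hf ⊢
          have hlen : p.length + ((PySem.Chars.join [','] (q :: rest)).length + 1) ≤ fuel := by
            simpa [List.length_append, Nat.add_assoc] using hf
          have h1 : p.length ≤ fuel := by omega
          rw [List.append_assoc, go_skip p hpf fuel _ [] acc h1]
          have : fuel - p.length = (fuel - p.length - 1) + 1 := by omega
          rw [this, List.singleton_append, go_cons_comma]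
          rw [ih (by simp) hcf' (fuel - p.length - 1) _ (by omega)]
          simp

theorem splitOn_join (ps : List (List Char)) (hne : ps ≠ []) (hcf : ∀ p ∈ ps, ',' ∉ p) :
    PySem.Chars.splitOn (PySem.Chars.join [','] ps) [','] = ps := by
  unfold PySem.Chars.splitOn
  rw [go_join ps hne hcf _ [] (Nat.le_succ _)]
  simp

theorem go_ne_nil : ∀ (fuel : Nat) (l cur : List Char) (acc : List (List Char)),
    PySem.Chars.splitOn.go [','] fuel l cur acc ≠ [] := by
  intro fuel
  induction fuel with
  | zero => intro l cur acc; cases l <;> simp [PySem.Chars.splitOn.go]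
  | succ fuel ih =>
      intro l cur acc
      cases l with
      | nil => simp [go_nil]
      | cons c rest =>
          by_cases hc : c = ','
          · subst hc; rw [go_cons_comma]; exact ih _ _ _
          · rw [go_cons_ne fuel c rest cur acc hc]; exact ih _ _ _

theorem go_comma_free : ∀ (fuel : Nat) (l cur : List Char) (acc : List (List Char)),
    l.length ≤ fuel → ',' ∉ cur → (∀ p ∈ acc, ',' ∉ p) →
    ∀ p ∈ PySem.Chars.splitOn.go [','] fuel l cur acc, ',' ∉ p := by
  intro fuel
  induction fuel with
  | zero =>
      intro l cur acc hf hcur hacc p hp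
      have : l = [] := List.eq_nil_of_length_eq_zero (Nat.le_zero.mp hf)
      subst this
      rw [go_nil] at hp
      simp at hp
      rcases hp with h | h
      · exact hacc p h
      · exact h ▸ (by simpa using hcur)
  | succ fuel ih =>
      intro l cur acc hf hcur hacc p hp
      cases l with
      | nil =>
          rw [go_nil] at hp
          simp at hp
          rcases hp with h | h
          · exact hacc p h
          · exact h ▸ (by simpa using hcur)
      | cons c rest =>
          by_cases hc : c = ','
          · subst hc
            rw [go_cons_comma] at hp
            refine ih rest [] (cur.reverse :: acc) (by simpa using hf) (by simp) ?_ p hp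
            intro q hq
            simp at hq
            rcases hq with h | h
            · exact h ▸ (by simpa using hcur)
            · exact hacc q h
          · rw [go_cons_ne fuel c rest cur acc hc] at hp
            exact ih rest (c :: cur) acc (by simpa using hf) (by simp [hcur, Ne.symm hc]) hacc p hp

theorem splitOn_ne_nil (s : List Char) : PySem.Chars.splitOn s [','] ≠ [] :=
  go_ne_nil _ _ _ _

theorem splitOn_comma_free (s : List Char) :
    ∀ p ∈ PySem.Chars.splitOn s [','], ',' ∉ p :=
  go_comma_free _ _ _ _ (Nat.le_succ _) (by simp) (by simp)

-- joining k parts yields at least k-1 characters (the separators)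
theorem join_length_ge (ps : List (List Char)) :
    ps.length - 1 ≤ (PySem.Chars.join [','] ps).length := by
  induction ps with
  | nil => simp
  | cons p ps ih =>
      cases ps with
      | nil => simp
      | cons q rest =>
          rw [PySem.Chars.join_cons_cons]
          simp only [List.length_append, List.length_cons] at ih ⊢
          omega

-- the loop correspondence: A's loop on join(parts[:k]) equals B's scan over k-1, …, 1
theorem loop_eq (ps : List (List Char)) (l : Int) (hcf : ∀ p ∈ ps, ',' ∉ p) :
    ∀ (k : Nat), 1 ≤ k → k ≤ ps.length → ∀ (fuel : Nat), k ≤ fuel →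
      shorten_str_aLoop l fuel (PySem.Chars.join [','] (ps.take k)) =
        (shorten_str_bLoop ps l (PySem.List.pyRange ((k : Int) - 1) 0 (-1))).getD
          (PySem.List.slice (PySem.List.pyGetD ps 0 []) none (some (l - 3)) ++ ['.', '.', '.']) := by
  intro k hk
  induction k, hk using Nat.le_induction with
  | base =>
      intro hle fuel hfuel
      obtain ⟨p, ps', rfl⟩ : ∃ p ps', ps = p :: ps' := by
        cases ps with
        | nil => simp at hle
        | cons p ps' => exact ⟨p, ps', rfl⟩
      cases fuel with
      | zero => omega
      | succ f =>
          have hsplit : PySem.Chars.splitOn p [','] = [p] := by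
            have := splitOn_join [p] (by simp) (by
              intro q hq; simp at hq; subst hq; exact hcf _ List.mem_cons_self)
            simpa [PySem.Chars.join_singleton] using this
          rw [PySem.List.pyRange_neg_one_eq_nil (by norm_num)]
          simp [shorten_str_aLoop, shorten_str_bLoop, hsplit,
            PySem.Chars.join_singleton, PySem.List.pyGetD]
  | succ k hk ih =>
      intro hle fuel hfuel
      cases fuel with
      | zero => omega
      | succ f =>
          have hne : ps.take (k + 1) ≠ [] := by
            cases ps with
            | nil => simp at hle
            | cons p ps' => simp
          have hsplit := splitOn_join (ps.take (k + 1)) hne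
            (fun q hq => hcf q (List.mem_of_mem_take hq))
          have hlen : (ps.take (k + 1)).length = k + 1 := by
            rw [List.length_take]; omega
          have hdrop : (ps.take (k + 1)).dropLast = ps.take k := by
            rw [List.dropLast_eq_take, hlen]
            simp [List.take_take]
          have hcast : ((k : Int)).toNat = k := by simp
          have hcons : PySem.List.pyRange (((k + 1 : Nat) : Int) - 1) 0 (-1)
              = (k : Int) :: PySem.List.pyRange ((k : Int) - 1) 0 (-1) := by
            have h1 : ((k + 1 : Nat) : Int) - 1 = (k : Int) := by push_cast; ring
            rw [h1, PySem.List.pyRange_neg_one_cons (by exact_mod_cast hk)]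
          have hsl : PySem.List.slice ps none (some (k : Int)) = ps.take k := by
            rw [PySem.List.slice_to ps (by exact_mod_cast Nat.zero_le k), hcast]
          rw [hcons]
          simp only [shorten_str_aLoop, shorten_str_bLoop, hsplit,
            PySem.List.slice_to_neg_one, hdrop, hlen, hsl, PySem.Chars.len_eq]
          have hgt : 1 < k + 1 := by omega
          simp only [if_pos hgt]
          by_cases hcond : ((PySem.Chars.join [','] (ps.take k)).length : Int) < l - 3
          · simp only [if_pos hcond, Option.getD_some]
          · simp only [if_neg hcond]
            exact ih (by omega) f (by omega)

-- ===== VERDICT (by name: the statement is the Claim_ definition above) =====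
theorem shorten_str_spec : Claim_equal_shorten_str := by
  intro string l _
  unfold Spec_shorten_str shorten_str shorten_str_alt
  dsimp only
  set cs := string.toList with hcs
  set ps := PySem.Chars.splitOn cs [','] with hps
  set s0 := PySem.Chars.join [','] (PySem.List.slice ps none (some (-1))) with hs0
  split_ifs with h1 h2
  · rfl
  · rfl
  · have hpsne : ps ≠ [] := splitOn_ne_nil cs
    have hn2 : 2 ≤ ps.length := by
      rcases ps with _ | ⟨p, _ | ⟨q, rest⟩⟩
      · exact absurd rfl hpsne
      · exfalso; apply h2
        rw [hs0, PySem.List.slice_to_neg_one]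
        simp [PySem.Chars.join_nil, PySem.Chars.len]
      · simp
    have hs0take : s0 = PySem.Chars.join [','] (ps.take (ps.length - 1)) := by
      rw [hs0, PySem.List.slice_to_neg_one, List.dropLast_eq_take]
    have hfuel : ps.length - 1 ≤ s0.length + 1 := by
      have := join_length_ge (ps.take (ps.length - 1))
      rw [List.length_take] at this
      rw [hs0take]
      omega
    have hloop := loop_eq ps l (splitOn_comma_free cs) (ps.length - 1)
      (by omega) (by omega) (s0.length + 1) hfuel
    rw [← hs0take] at hloop
    have hcast2 : ((ps.length - 1 : Nat) : Int) - 1 = (ps.length : Int) - 2 := by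
      omega
    rw [hcast2] at hloop
    rw [hloop]
    cases hb : shorten_str_bLoop ps l (PySem.List.pyRange ((ps.length : Int) - 2) 0 (-1)) with
    | none => simp
    | some r => simp
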